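-- pv_equiv track=rewrite | github.com/Jeremyywb/TextCompete | basemodel/models.py | split_text_length
-- ===== SOURCE A (Python) =====
-- def split_text_length(L):
--     segments = []
--     cumL = 0
--     while L > 320:
--         cumL+=256
--         segments.append(cumL)
--         L -= 256
--     segments.append(L+cumL)
--     return segments
-- ===== SOURCE B (Python) =====
-- def split_text_length(L):
--     n = 0 if L <= 320 else (L - 321) // 256 + 1
--     return [256 * i for i in range(1, n + 1)] + [L]
-- ===== Notes on version B (the rewrite author's own statement) =====
-- stated objective: simpler
-- what changed: Replaced the accumulating while-loop with a closed-form floor-division count of the segments plus a range comprehension, using that A's last element always equals the original input.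
import Mathlib
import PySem

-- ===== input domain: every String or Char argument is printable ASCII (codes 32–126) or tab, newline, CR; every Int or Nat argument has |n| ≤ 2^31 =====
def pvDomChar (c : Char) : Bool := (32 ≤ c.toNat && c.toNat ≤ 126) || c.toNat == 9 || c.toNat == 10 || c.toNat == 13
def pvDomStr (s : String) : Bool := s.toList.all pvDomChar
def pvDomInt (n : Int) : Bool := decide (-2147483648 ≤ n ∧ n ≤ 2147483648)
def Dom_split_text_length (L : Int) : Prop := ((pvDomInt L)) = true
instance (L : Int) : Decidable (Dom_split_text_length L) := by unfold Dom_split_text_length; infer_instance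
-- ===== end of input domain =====

-- B replaces A's accumulating while-loop with a closed-form segment count and a range-built list (objective: simpler).

-- ===== PORT A =====
-- the while-loop of A: state (L, cumL, segments)
def split_text_length_loop (L cumL : Int) (segments : List Int) : List Int :=
  if _h : L > 320 then
    split_text_length_loop (L - 256) (cumL + 256) (segments ++ [cumL + 256])
  else
    segments ++ [L + cumL]
termination_by (L - 320).toNat
decreasing_by omega

def split_text_length (L : Int) : List Int :=
  split_text_length_loop L 0 []

-- ===== PORT B =====
-- B: n = 0 if L <= 320 else (L - 321) // 256 + 1;  [256*i for i in range(1, n+1)] + [L]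
def split_text_length_count (L : Int) : Int :=
  if L ≤ 320 then 0 else PySem.Int.floordiv (L - 321) 256 + 1

def split_text_length_alt (L : Int) : List Int :=
  ((PySem.List.pyRange 1 (split_text_length_count L + 1) 1).map (fun i => 256 * i)) ++ [L]

-- ===== PRECONDITION & SPEC =====
def Spec_split_text_length (L : Int) (out : List Int) : Prop := out = split_text_length_alt L
instance (L : Int) (out : List Int) : Decidable (Spec_split_text_length L out) := by unfold Spec_split_text_length; infer_instance

-- ===== CLAIM (what is proved, stated in full; the proofs are below) =====
def Claim_equal_split_text_length : Prop := ∀ (L : Int), Dom_split_text_length L → Spec_split_text_length L (split_text_length L)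

-- ===== LEMMAS AND PROOFS =====

theorem count_nonneg (L : Int) : 0 ≤ split_text_length_count L := by
  unfold split_text_length_count
  split_ifs with h
  · omega
  · have hb := (PySem.Int.floordiv_eq_iff_of_pos (a := L - 321) (b := 256)
      (q := PySem.Int.floordiv (L - 321) 256) (by omega)).mp rfl
    nlinarith [hb.1, hb.2]

-- B's closed-form count satisfies the same recurrence as A's loop
theorem count_rec (L : Int) (h : 320 < L) :
    split_text_length_count L = split_text_length_count (L - 256) + 1 := by
  unfold split_text_length_count
  rw [if_neg (by omega)]
  by_cases h576 : L - 256 ≤ 320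
  · rw [if_pos h576]
    have : PySem.Int.floordiv (L - 321) 256 = 0 :=
      (PySem.Int.floordiv_eq_iff_of_pos (by omega)).mpr (by omega)
    omega
  · rw [if_neg h576]
    have hb := (PySem.Int.floordiv_eq_iff_of_pos (a := L - 256 - 321) (b := 256)
      (q := PySem.Int.floordiv (L - 256 - 321) 256) (by omega)).mp rfl
    have : PySem.Int.floordiv (L - 321) 256 = PySem.Int.floordiv (L - 256 - 321) 256 + 1 :=
      (PySem.Int.floordiv_eq_iff_of_pos (by omega)).mpr (by constructor <;> nlinarith [hb.1, hb.2])
    omega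

-- B's result satisfies the recurrence of A's loop body
theorem alt_rec (L : Int) (h : 320 < L) :
    split_text_length_alt L = 256 :: (split_text_length_alt (L - 256)).map (· + 256) := by
  unfold split_text_length_alt
  rw [count_rec L h]
  have hn'0 : 0 ≤ split_text_length_count (L - 256) := count_nonneg (L - 256)
  set n' : Int := split_text_length_count (L - 256) with hn'
  rw [PySem.List.pyRange_one_cons (by omega : (1:Int) < n' + 1 + 1)]
  have hshift : PySem.List.pyRange (1+1) (n' + 1 + 1) 1
      = (PySem.List.pyRange 1 (n' + 1) 1).map (· + 1) := by
    rw [PySem.List.pyRange_one, PySem.List.pyRange_one]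
    have h2 : (n' + 1 + 1 - (1 + 1)).toNat = (n' + 1 - 1).toNat := by omega
    rw [h2, List.map_map]
    apply List.map_congr_left
    intro k _
    simp only [Function.comp_apply]
    omega
  rw [hshift]
  simp only [List.map_map, List.map_append, List.map_cons, List.cons_append]
  refine congrArg₂ _ (by norm_num) (congrArg₂ _ ?_ (by simp))
  apply List.map_congr_left
  intro k _
  simp only [Function.comp_apply]
  ring

-- loop invariant: the loop appends B's (shifted) result to the accumulator
theorem loop_eq (k : Nat) : ∀ (L cumL : Int) (segments : List Int), (L - 320).toNat = k →
    split_text_length_loop L cumL segments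
      = segments ++ (split_text_length_alt L).map (· + cumL) := by
  induction k using Nat.strong_induction_on with
  | _ k ih =>
    intro L cumL segments hk
    by_cases h : 320 < L
    · rw [split_text_length_loop, dif_pos h,
        ih (L - 256 - 320).toNat (by omega) (L - 256) (cumL + 256) _ rfl,
        alt_rec L h]
      simp only [List.map_map, List.map_cons, List.append_assoc, List.singleton_append]
      refine congrArg _ (congrArg₂ _ (by ring) ?_)
      apply List.map_congr_left
      intro x _
      simp only [Function.comp_apply]
      ring
    · rw [split_text_length_loop, dif_neg h]
      unfold split_text_length_alt split_text_length_count
      rw [if_pos (by omega)]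
      rw [PySem.List.pyRange_one_eq_nil (by omega)]
      simp [Int.add_comm]

-- ===== VERDICT (by name: the statement is the Claim_ definition above) =====
theorem split_text_length_spec : Claim_equal_split_text_length := by
  intro L _
  unfold Spec_split_text_length split_text_length
  rw [loop_eq (L - 320).toNat L 0 [] rfl]
  simp
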